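-- pv_equiv track=rewrite | github.com/HSeo-git/Coding-Test | 2022 KAKAO Q1.py | solution
-- ===== SOURCE A (Python) =====
-- from collections import defaultdict
--
-- def solution(id_list, report, k):
--     #전처리 : 동일 유저 중복신고 처리
--     new_report = set(report)
--
--     #new_report 돌면서 신고내용 dict화
--     #(dict) key 이용자: value 신고한 유저리스트
--     report_dict = defaultdict(list)
--     for re in new_report:
--         reporter, target = re.split(" ")
--         report_dict[target].append(reporter)
--
--     #안내메일 받을 이용자 정리
--     #(dict) key 이용자: value 안내메일 횟수
--     mail_dict = {}
--     for id in id_list: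
--         mail_dict[id] = 0
--     #report_dict돌면서 대상자 확인 후, mail_dict에 안내 횟수 넣어주기
--     for result in report_dict.values():
--         if len(result) >= k:
--             for v in result:
--                 mail_dict[v] += 1
--         else:
--             continue
--
--     answer = list(mail_dict.values())
--     return answer
-- ===== SOURCE B (Python) =====
-- def solution(id_list, report, k):
--     pairs = [r.split(" ") for r in set(report)]
--     banned = {t for _, t in pairs if sum(t2 == t for _, t2 in pairs) >= k}
--     return [sum(rep == i and t in banned for rep, t in pairs) for i in id_list]
-- ===== Notes on version B (the rewrite author's own statement) =====
-- stated objective: alternative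
-- what changed: B keeps no mail dict and no target->reporters grouping at all: it parses the deduped reports once into pairs, computes the banned targets by a direct count comprehension, and builds the answer output-driven, one comprehension entry per id counting that id's reports aimed at banned targets.
-- outside the precondition, e.g. on solution(['a', 'a'], ['a a'], 1): A returns [1], B returns [1, 1]
import Mathlib
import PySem

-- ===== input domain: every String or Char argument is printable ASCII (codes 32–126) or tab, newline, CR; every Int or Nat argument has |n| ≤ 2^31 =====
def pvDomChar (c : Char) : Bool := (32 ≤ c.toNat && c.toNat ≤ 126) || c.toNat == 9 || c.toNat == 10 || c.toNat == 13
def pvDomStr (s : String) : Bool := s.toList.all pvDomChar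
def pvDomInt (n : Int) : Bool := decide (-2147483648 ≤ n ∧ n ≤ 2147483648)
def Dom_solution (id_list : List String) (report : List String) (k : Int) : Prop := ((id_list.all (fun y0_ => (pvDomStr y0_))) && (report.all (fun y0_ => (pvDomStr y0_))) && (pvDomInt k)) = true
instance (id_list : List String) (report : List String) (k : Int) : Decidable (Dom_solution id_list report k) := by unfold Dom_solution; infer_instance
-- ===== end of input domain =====

-- B keeps no mail dict and no target→reporters grouping: it parses the deduped reports once into
-- pairs, computes the banned targets by a direct count comprehension, and builds the answer
-- output-driven — one entry per id, counting that id's reports aimed at banned targets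
-- (objective: alternative; B is quadratic where A is linear).

-- shared parsing helper, used by the precondition below (the ports inline their own split)
-- pvParse s = the (reporter, target) pair of a report, none when it does not split into two fields
def pvParse (s : String) : Option (String × String) :=
  match PySem.Str.split? s " " with
  | some [r, t] => some (r, t)
  | _ => none

-- ===== PORT A =====
def solution (id_list : List String) (report : List String) (k : Int) : List Int :=
  let new_report : PySem.Set String := PySem.Set.ofList report
  let report_dict : PySem.Dict String (List String) :=
    new_report.foldl (fun d re =>
      match PySem.Str.split? re " " with
      | some [reporter, target] => d.modify target [] (fun l => l ++ [reporter])
      | _ => d)                      -- Python raises ValueError here (excluded by Pre_)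
      PySem.Dict.empty
  let mail_dict : PySem.Dict String Int :=
    id_list.foldl (fun d id => d.insert id 0) PySem.Dict.empty
  let mail_dict :=
    report_dict.values.foldl (fun m result =>
      if k ≤ (result.length : Int) then
        result.foldl (fun m v =>
          match m.get? v with
          | some c => m.insert v (c + 1)
          | none => m) m             -- Python raises KeyError here (excluded by Pre_)
      else m) mail_dict
  mail_dict.values

-- ===== PORT B =====
def solution_alt (id_list : List String) (report : List String) (k : Int) : List Int :=
  let pairs : List (List String) :=
    (PySem.Set.ofList report).map (fun r => (PySem.Str.split? r " ").getD [])
  let banned : PySem.Set String :=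
    PySem.Set.ofList (pairs.filterMap (fun p =>
      match p with
      | [_, t] =>
          if k ≤ ((pairs.countP (fun q => match q with | [_, t2] => t2 == t | _ => false) : Int))
          then some t else none
      | _ => none))                  -- Python raises ValueError (unpacking) here (excluded by Pre_)
  id_list.map (fun i =>
    ((pairs.countP (fun p => match p with
        | [rep, t] => rep == i && banned.contains t
        | _ => false)) : Int))

-- ===== PRECONDITION & SPEC =====
-- Pre_ excludes (a) the inputs on which A raises: a report that does not split on a single space
-- into exactly two fields (ValueError), or a reporter of a target with ≥ k distinct reports who
-- is absent from id_list (KeyError); and (b) id_lists with duplicate ids, on which A's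
-- dict-reinsertion collapses the duplicates (one output entry per distinct id) — an accidental
-- corner no caller specifies, where B naturally keeps one entry per list position.
def Pre_solution (id_list : List String) (report : List String) (k : Int) : Prop :=
  id_list.Nodup ∧
  ∀ s ∈ report, (pvParse s).isSome = true ∧
    ∀ p ∈ (pvParse s).toList,
      k ≤ (((PySem.Set.ofList report).filter
              (fun s' => (pvParse s').map Prod.snd == some p.2)).length : Int) →
        p.1 ∈ id_list
instance (id_list : List String) (report : List String) (k : Int) : Decidable (Pre_solution id_list report k) := by unfold Pre_solution; infer_instance

def pvWitness_solution : List String × List String × Int :=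
  (["muzi", "frodo", "apeach"], ["muzi frodo", "apeach frodo", "muzi apeach"], 2)

def Spec_solution (id_list : List String) (report : List String) (k : Int) (out : List Int) : Prop := out = solution_alt id_list report k
instance (id_list : List String) (report : List String) (k : Int) (out : List Int) : Decidable (Spec_solution id_list report k out) := by unfold Spec_solution; infer_instance

-- ===== CLAIM (what is proved, stated in full; the proofs are below) =====
def Claim_equal_solution : Prop := ∀ (id_list : List String) (report : List String) (k : Int), Dom_solution id_list report k → Pre_solution id_list report k → Spec_solution id_list report k (solution id_list report k)

-- ===== LEMMAS AND PROOFS =====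

-- canonical pieces both ports reduce to
def pvRep (s : String) : String := ((pvParse s).getD ("", "")).1
def pvTgt (s : String) : String := ((pvParse s).getD ("", "")).2
def pvInc (m : PySem.Dict String Int) (v : String) : PySem.Dict String Int :=
  match m.get? v with
  | some c => m.insert v (c + 1)
  | none => m
def pvCnt (report : List String) (t : String) : Nat :=
  (PySem.Set.ofList report).countP (fun s => pvTgt s == t)
def pvGrp (report : List String) (t : String) : List String :=
  ((PySem.Set.ofList report).filter (fun s => pvTgt s == t)).map pvRep
def pvMail0 (id_list : List String) : PySem.Dict String Int :=
  id_list.foldl (fun d i => d.insert i 0) PySem.Dict.empty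
def pvQual (report : List String) (k : Int) : List String :=
  (PySem.Set.ofList ((PySem.Set.ofList report).map pvTgt)).filter
    (fun t => decide (k ≤ (pvCnt report t : Int)))
def pvLA (report : List String) (k : Int) : List String :=
  ((pvQual report k).map (pvGrp report)).flatten
def pvLB (report : List String) (k : Int) : List String :=
  ((PySem.Set.ofList report).filter
    (fun s => decide (k ≤ (pvCnt report (pvTgt s) : Int)))).map pvRep
def pvOut (id_list : List String) (L : List String) : List Int :=
  (pvMail0 id_list).keys.map
    (fun x => (pvMail0 id_list).getD x 0 +
      if ((pvMail0 id_list).get? x).isSome then (L.count x : Int) else 0)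

-- parse facts
theorem pv_split_of_parse {s r t : String} (h : pvParse s = some (r, t)) :
    PySem.Str.split? s " " = some [r, t] := by
  unfold pvParse at h; split at h <;> simp_all

theorem pvRep_eq {s r t : String} (h : pvParse s = some (r, t)) : pvRep s = r := by
  simp [pvRep, h]

theorem pvTgt_eq {s r t : String} (h : pvParse s = some (r, t)) : pvTgt s = t := by
  simp [pvTgt, h]

-- pvInc basics
theorem pv_keys_inc (m : PySem.Dict String Int) (v : String) : (pvInc m v).keys = m.keys := by
  unfold pvInc
  cases h : m.get? v with
  | none => rfl
  | some c =>
      exact PySem.Dict.keys_insert_of_contains m _ (by rw [PySem.Dict.contains_eq_isSome_get?, h]; rfl)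

theorem pv_isSome_inc (m : PySem.Dict String Int) (v x : String) :
    ((pvInc m v).get? x).isSome = (m.get? x).isSome := by
  unfold pvInc
  cases h : m.get? v with
  | none => rfl
  | some c =>
      rw [PySem.Dict.get?_insert]
      split_ifs with hx
      · subst hx; rw [h]; rfl
      · rfl

theorem pv_getD_inc (m : PySem.Dict String Int) (v x : String) :
    (pvInc m v).getD x 0 =
      m.getD x 0 + (if x = v ∧ (m.get? v).isSome then 1 else 0) := by
  unfold pvInc
  cases h : m.get? v with
  | none => simp
  | some c =>
      rw [PySem.Dict.getD_insert]
      have hv : m.getD v 0 = c := by rw [PySem.Dict.getD_eq_get?_getD, h]; rfl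
      split_ifs with hx <;> simp_all

theorem pv_keys_foldl_inc (L : List String) (m : PySem.Dict String Int) :
    (L.foldl pvInc m).keys = m.keys := by
  induction L generalizing m with
  | nil => rfl
  | cons a L ih => rw [List.foldl_cons, ih, pv_keys_inc]

theorem pv_getD_foldl_inc (L : List String) (m : PySem.Dict String Int) (x : String) :
    (L.foldl pvInc m).getD x 0 =
      m.getD x 0 + (if (m.get? x).isSome then (L.count x : Int) else 0) := by
  induction L generalizing m with
  | nil => simp
  | cons a L ih =>
      rw [List.foldl_cons, ih, pv_getD_inc, pv_isSome_inc, List.count_cons]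
      by_cases hxa : x = a
      · subst hxa
        by_cases hs : (m.get? x).isSome = true <;> simp [hs] <;> ring
      · have : (a == x) = false := by simp; exact fun h => hxa h.symm
        simp [this, hxa]

theorem pv_values_foldl_inc (L : List String) (id_list : List String) :
    (L.foldl pvInc (pvMail0 id_list)).values = pvOut id_list L := by
  have hnd : (pvMail0 id_list).keys.Nodup := by
    unfold pvMail0
    exact PySem.Dict.nodup_keys_foldl_insert _ _ _ (by simp [PySem.Dict.keys_empty])
  have hnd' : (L.foldl pvInc (pvMail0 id_list)).keys.Nodup := by
    rw [pv_keys_foldl_inc]; exact hnd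
  rw [PySem.Dict.values_eq_map_keys _ hnd' 0, pv_keys_foldl_inc, pvOut]
  exact List.map_congr_left (fun x _ => pv_getD_foldl_inc L _ x)

-- loop shape of A's warning pass
theorem pv_foldl_if_flatten (k : Int) (vs : List (List String)) (m : PySem.Dict String Int) :
    vs.foldl (fun m r => if k ≤ (r.length : Int) then r.foldl pvInc m else m) m =
      ((vs.filter (fun r => decide (k ≤ (r.length : Int)))).flatten).foldl pvInc m := by
  induction vs generalizing m with
  | nil => rfl
  | cons a vs ih =>
      rw [List.foldl_cons, List.filter_cons]
      by_cases h : k ≤ (a.length : Int)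
      · simp only [h, if_pos, decide_true, ih, List.flatten_cons, List.foldl_append]
      · simp only [h, decide_false, ih, if_false]
        simp [h]

-- indicator sums over a nodup key list
theorem pv_sum_map_add (K : List String) (f g : String → Nat) :
    (K.map (fun t => f t + g t)).sum = (K.map f).sum + (K.map g).sum := by
  induction K with
  | nil => rfl
  | cons a K ih => simp [ih]; omega

theorem pv_sum_ind (t0 : String) (l : List String) :
    (l.map (fun t => if t0 == t then 1 else 0)).sum = l.count t0 := by
  induction l with
  | nil => rfl
  | cons a l ih =>
      rw [List.map_cons, List.sum_cons, ih, List.count_cons]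
      by_cases h : t0 = a
      · subst h; simp [Nat.add_comm]
      · have h1 : (t0 == a) = false := by simp [h]
        have h2 : (a == t0) = false := by simp; exact fun e => h e.symm
        simp [h1, h2]

theorem pv_indicator (K : List String) (hK : K.Nodup) (q : String → Bool)
    (t0 : String) (h : t0 ∈ K) (c : Bool) :
    ((K.filter q).map (fun t => if c && (t0 == t) then 1 else 0)).sum =
      if c && q t0 then 1 else 0 := by
  cases c with
  | false => simp
  | true =>
      simp only [Bool.true_and]
      rw [pv_sum_ind]
      by_cases hq : q t0 = true
      · rw [List.count_filter hq, List.count_eq_one_of_mem hK h, if_pos hq]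
      · rw [if_neg hq, List.count_eq_zero.2]
        intro hmem
        exact hq (List.mem_filter.1 hmem).2

theorem pv_core (q : String → Bool) (rb : String → Bool) (tg : String → String)
    (K : List String) (hK : K.Nodup) :
    ∀ (L : List String), (∀ s ∈ L, tg s ∈ K) →
      ((K.filter q).map (fun t => L.countP (fun s => rb s && (tg s == t)))).sum =
        L.countP (fun s => rb s && q (tg s)) := by
  intro L
  induction L with
  | nil => intro _; simp
  | cons s L ih =>
      intro hmem
      have hs : tg s ∈ K := hmem s (List.mem_cons_self)
      have hL : ∀ x ∈ L, tg x ∈ K := fun x hx => hmem x (List.mem_cons_of_mem _ hx)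
      simp only [List.countP_cons]
      rw [pv_sum_map_add, ih hL, pv_indicator K hK q (tg s) hs (rb s)]

-- reduction of port A to the canonical form
theorem pv_A_side (id_list report : List String) (k : Int)
    (hpre : ∀ s ∈ report, (pvParse s).isSome = true) :
    solution id_list report k = pvOut id_list (pvLA report k) := by
  show ((((PySem.Set.ofList report).foldl
      (fun d re => match PySem.Str.split? re " " with
        | some [reporter, target] => d.modify target [] (fun l => l ++ [reporter])
        | _ => d) PySem.Dict.empty).values).foldl
      (fun m result => if k ≤ (result.length : Int) then result.foldl pvInc m else m)
      (pvMail0 id_list)).values = pvOut id_list (pvLA report k)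
  have hrd : (PySem.Set.ofList report).foldl
      (fun d re => match PySem.Str.split? re " " with
        | some [reporter, target] => d.modify target [] (fun l => l ++ [reporter])
        | _ => d) PySem.Dict.empty
      = ((PySem.Set.ofList report).map (fun s => (pvTgt s, pvRep s))).foldl
          (fun d p => d.modify p.1 [] (fun l => l ++ [p.2])) PySem.Dict.empty := by
    rw [List.foldl_map]
    apply PySem.List.foldl_congr_mem
    intro acc s hs
    obtain ⟨⟨r, t⟩, hp⟩ := Option.isSome_iff_exists.1 (hpre s ((PySem.Set.mem_ofList report s).1 hs))
    rw [pv_split_of_parse hp, pvRep_eq hp, pvTgt_eq hp]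
  rw [hrd]
  have hnd : (((PySem.Set.ofList report).map (fun s => (pvTgt s, pvRep s))).foldl
      (fun d p => d.modify p.1 [] (fun l => l ++ [p.2])) PySem.Dict.empty).keys.Nodup := by
    apply PySem.Dict.nodup_keys_foldl_modify_key _ Prod.fst [] (fun d p => (fun l => l ++ [p.2]))
    simp [PySem.Dict.keys_empty]
  have hval : (((PySem.Set.ofList report).map (fun s => (pvTgt s, pvRep s))).foldl
      (fun d p => d.modify p.1 [] (fun l => l ++ [p.2])) PySem.Dict.empty).values
      = (PySem.Set.ofList ((PySem.Set.ofList report).map pvTgt)).map (pvGrp report) := by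
    rw [PySem.Dict.values_eq_map_keys _ hnd [],
        PySem.Dict.keys_foldl_modify_key _ Prod.fst [] (fun d p => (fun l => l ++ [p.2])),
        PySem.Dict.keys_empty, PySem.Set.update_nil_left, List.map_map]
    apply List.map_congr_left
    intro t _
    rw [PySem.Dict.getD_foldl_modify_append, PySem.Dict.getD_empty, List.nil_append,
        List.filter_map, List.map_map]
    rfl
  rw [hval, pv_foldl_if_flatten, List.filter_map]
  have hq : (PySem.Set.ofList ((PySem.Set.ofList report).map pvTgt)).filter
      ((fun r => decide (k ≤ (r.length : Int))) ∘ pvGrp report) = pvQual report k := by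
    unfold pvQual
    apply List.filter_congr
    intro t _
    have hlen : (pvGrp report t).length = pvCnt report t := by
      rw [pvGrp, List.length_map, pvCnt]
      exact List.countP_eq_length_filter.symm
    simp [Function.comp, hlen]
  rw [hq, pv_values_foldl_inc]
  rfl

-- the deduped parsed pairs B works on, in canonical form
theorem pv_pairs_eq (report : List String)
    (hpre : ∀ s ∈ report, (pvParse s).isSome = true) :
    (PySem.Set.ofList report).map (fun r => (PySem.Str.split? r " ").getD [])
      = (PySem.Set.ofList report).map (fun s => [pvRep s, pvTgt s]) := by
  apply List.map_congr_left
  intro s hs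
  obtain ⟨⟨r, t⟩, hp⟩ := Option.isSome_iff_exists.1 (hpre s ((PySem.Set.mem_ofList report s).1 hs))
  rw [pv_split_of_parse hp, pvRep_eq hp, pvTgt_eq hp]
  rfl

-- reduction of port B to per-id counts over pvLB
theorem pv_B_side (id_list report : List String) (k : Int)
    (hpre : ∀ s ∈ report, (pvParse s).isSome = true) :
    solution_alt id_list report k = id_list.map (fun i => ((pvLB report k).count i : Int)) := by
  unfold solution_alt
  rw [pv_pairs_eq report hpre]
  have hcntP : ∀ t : String,
      ((PySem.Set.ofList report).map (fun s => [pvRep s, pvTgt s])).countP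
        (fun q => match q with | [_, t2] => t2 == t | _ => false) = pvCnt report t := by
    intro t
    rw [List.countP_map]
    rfl
  have hban : ∀ s0 ∈ PySem.Set.ofList report,
      (PySem.Set.ofList
        (((PySem.Set.ofList report).map (fun s => [pvRep s, pvTgt s])).filterMap
          (fun p => match p with
            | [_, t] =>
                if k ≤ ((((PySem.Set.ofList report).map (fun s => [pvRep s, pvTgt s])).countP
                    (fun q => match q with | [_, t2] => t2 == t | _ => false) : Int))
                then some t else none
            | _ => none))).contains (pvTgt s0)
        = decide (k ≤ (pvCnt report (pvTgt s0) : Int)) := by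
    intro s0 hs0
    rw [List.filterMap_map]
    apply Bool.coe_iff_coe.mp
    rw [PySem.Set.contains_iff, PySem.Set.mem_ofList, List.mem_filterMap]
    constructor
    · rintro ⟨s', _, hfs⟩
      simp only [Function.comp] at hfs
      rw [hcntP (pvTgt s')] at hfs
      split_ifs at hfs with hk
      · simp only [Option.some.injEq] at hfs
        rw [← hfs]
        simpa using hk
    · intro hk
      refine ⟨s0, hs0, ?_⟩
      simp only [Function.comp]
      rw [hcntP (pvTgt s0)]
      rw [if_pos (by simpa using hk)]
  apply List.map_congr_left
  intro i _
  have hLB : (pvLB report k).count i =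
      (PySem.Set.ofList report).countP
        (fun s => (pvRep s == i) && decide (k ≤ (pvCnt report (pvTgt s) : Int))) := by
    rw [pvLB, List.count_eq_countP, List.countP_map, List.countP_filter]
    rfl
  rw [List.countP_map, hLB]
  congr 1
  apply List.countP_congr
  intro s hs
  simp only [Function.comp]
  rw [hban s hs]

-- the two increment multisets have the same counts
theorem pv_counts (report : List String) (k : Int) (x : String) :
    (pvLA report k).count x = (pvLB report k).count x := by
  have hgrpcount : ∀ t, (pvGrp report t).count x =
      (PySem.Set.ofList report).countP (fun s => (pvRep s == x) && (pvTgt s == t)) := by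
    intro t
    rw [pvGrp, List.count_eq_countP, List.countP_map, List.countP_filter]
    rfl
  have hLA : (pvLA report k).count x =
      (((PySem.Set.ofList ((PySem.Set.ofList report).map pvTgt)).filter
          (fun t => decide (k ≤ (pvCnt report t : Int)))).map
        (fun t => (PySem.Set.ofList report).countP
          (fun s => (pvRep s == x) && (pvTgt s == t)))).sum := by
    rw [pvLA, List.count_flatten, List.map_map, pvQual]
    apply congrArg
    apply List.map_congr_left
    intro t _
    exact hgrpcount t
  rw [hLA]
  have hLB : (pvLB report k).count x =
      (PySem.Set.ofList report).countP
        (fun s => (pvRep s == x) && decide (k ≤ (pvCnt report (pvTgt s) : Int))) := by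
    rw [pvLB, List.count_eq_countP, List.countP_map, List.countP_filter]
    rfl
  rw [hLB]
  exact pv_core (fun t => decide (k ≤ (pvCnt report t : Int))) (fun s => pvRep s == x) pvTgt
    (PySem.Set.ofList ((PySem.Set.ofList report).map pvTgt)) (PySem.Set.nodup_ofList _)
    (PySem.Set.ofList report)
    (fun s hs => (PySem.Set.mem_ofList _ _).2 (List.mem_map_of_mem hs))

-- the mail dict starts at 0 everywhere
theorem pv_getD_mail0_aux (l : List String) (d : PySem.Dict String Int)
    (h : ∀ y, d.getD y 0 = 0) (x : String) :
    (l.foldl (fun d i => d.insert i 0) d).getD x 0 = 0 := by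
  induction l generalizing d with
  | nil => exact h x
  | cons a l ih =>
      rw [List.foldl_cons]
      apply ih
      intro y
      rw [PySem.Dict.getD_insert]
      split_ifs with hy
      · rfl
      · exact h y

theorem pv_keys_mail0 (id_list : List String) (hnd : id_list.Nodup) :
    (pvMail0 id_list).keys = id_list := by
  unfold pvMail0
  rw [PySem.Dict.keys_foldl_insert, PySem.Dict.keys_empty, PySem.Set.update_nil_left]
  exact PySem.Set.ofList_eq_self_of_nodup _ hnd

theorem pv_pvOut_nodup (id_list : List String) (hnd : id_list.Nodup) (L : List String) :
    pvOut id_list L = id_list.map (fun i => (L.count i : Int)) := by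
  unfold pvOut
  rw [pv_keys_mail0 id_list hnd]
  apply List.map_congr_left
  intro x hx
  have hmem : x ∈ (pvMail0 id_list).keys := by rw [pv_keys_mail0 id_list hnd]; exact hx
  have hsome : ((pvMail0 id_list).get? x).isSome = true := by
    rw [← PySem.Dict.contains_eq_isSome_get?]
    exact (PySem.Dict.contains_iff_mem_keys _ _).2 hmem
  have hzero : (pvMail0 id_list).getD x 0 = 0 :=
    pv_getD_mail0_aux id_list PySem.Dict.empty (fun y => by rw [PySem.Dict.getD_empty]) x
  rw [hsome, hzero, if_pos rfl, zero_add]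

-- ===== VERDICT (by name: the statement is the Claim_ definition above) =====
theorem solution_spec : Claim_equal_solution := by
  intro id_list report k _hdom hpre
  unfold Spec_solution
  have hp : ∀ s ∈ report, (pvParse s).isSome = true := fun s hs => (hpre.2 s hs).1
  rw [pv_A_side id_list report k hp, pv_B_side id_list report k hp,
      pv_pvOut_nodup id_list hpre.1]
  apply List.map_congr_left
  intro x _
  rw [pv_counts]
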